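-- pv_equiv track=rewrite | github.com/ivanprytula/data-pipeline-async | scripts/ci/check_service_boundaries.py | module_to_service
-- ===== SOURCE A (Python) =====
-- SHARED_LIBS: frozenset[str] = frozenset({"libs.platform", "libs.contracts"})
--
-- def module_to_service(module: str) -> str | None:
--     """Return the owning service name for a module string, or None.
--
--     Returns None for:
--     - stdlib / third-party modules
--     - libs.platform and libs.contracts (shared, always allowed)
--     """
--     # Shared libs are always allowed — not owned by any single service.
--     if module == "libs" or any(
--         module == lib or module.startswith(lib + ".") for lib in SHARED_LIBS
--     ):
--         return None
--
--     if module == "ingestor" or module.startswith("ingestor."):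
--         return "ingestor"
--
--     if module == "services" or module.startswith("services."):
--         parts = module.split(".")
--         if len(parts) >= 2:
--             svc = parts[1]
--             if svc in {"ai_gateway", "query_api", "processor", "dashboard"}:
--                 return svc
--     return None
-- ===== SOURCE B (Python) =====
-- def module_to_service(module: str) -> str | None:
--     """Return the owning service name for a module string, or None."""
--     root, sep, rest = module.partition(".")
--     if root == "ingestor":
--         return "ingestor"
--     if root == "services" and sep:
--         svc = rest.partition(".")[0]
--         if svc in {"ai_gateway", "query_api", "processor", "dashboard"}:
--             return svc
--     return None
-- ===== Notes on version B (the rewrite author's own statement) =====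
-- stated objective: simpler
-- what changed: B splits the module at its first dot once (str.partition) and dispatches on the root segment, dropping A's SHARED_LIBS branch (whose inputs fall through to None anyway) and all of A's repeated ==/startswith prefix scans and the full split.
import Mathlib
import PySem

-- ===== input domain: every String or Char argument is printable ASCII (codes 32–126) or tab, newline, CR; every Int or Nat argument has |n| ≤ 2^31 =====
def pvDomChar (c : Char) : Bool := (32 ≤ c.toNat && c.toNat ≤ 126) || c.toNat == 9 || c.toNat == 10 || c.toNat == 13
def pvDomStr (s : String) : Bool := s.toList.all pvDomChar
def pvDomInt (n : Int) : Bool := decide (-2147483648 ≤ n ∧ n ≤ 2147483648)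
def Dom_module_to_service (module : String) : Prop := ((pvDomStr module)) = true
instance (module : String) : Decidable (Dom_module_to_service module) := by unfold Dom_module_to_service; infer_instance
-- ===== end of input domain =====

-- B replaces A's chain of startswith prefix scans (and the redundant SHARED_LIBS branch)
-- by one split of the module at the first dot (str.partition) and dispatch on the root segment;
-- objective: simpler.

-- ===== PORT A =====
def module_to_service (module : String) : Option String :=
  if module == "libs" ||
      (PySem.Set.ofList ["libs.platform", "libs.contracts"]).any
        (fun lib => module == lib || PySem.Str.startswith module (lib ++ ".")) then
    none
  else if module == "ingestor" || PySem.Str.startswith module "ingestor." then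
    some "ingestor"
  else if module == "services" || PySem.Str.startswith module "services." then
    -- module.split("."): the separator "." is a non-empty literal, so Python's split cannot raise
    let parts := List.map String.ofList (PySem.Chars.splitOn module.toList ".".toList)
    if 2 ≤ parts.length then
      -- parts[1]: in range thanks to the length test just performed
      let svc := PySem.List.pyGetD parts 1 ""
      if (PySem.Set.ofList ["ai_gateway", "query_api", "processor", "dashboard"]).contains svc then
        some svc
      else
        none
    else
      none
  else
    none

-- ===== PORT B =====
-- str.partition(".") ported by hand over List Char (exact for a one-character separator):
-- (before the first '.', whether a '.' occurred, the remainder after it).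
def partitionDot : List Char → List Char × Bool × List Char
  | [] => ([], false, [])
  | c :: cs =>
    if c = '.' then ([], true, cs)
    else
      let p := partitionDot cs
      (c :: p.1, p.2.1, p.2.2)

def module_to_service_alt (module : String) : Option String :=
  let p := partitionDot module.toList
  if p.1 = "ingestor".toList then
    some "ingestor"
  else if p.1 = "services".toList ∧ p.2.1 = true then
    let svc := (partitionDot p.2.2).1
    if svc ∈ ["ai_gateway".toList, "query_api".toList, "processor".toList, "dashboard".toList] then
      some (String.ofList svc)
    else
      none
  else
    none

-- ===== PRECONDITION & SPEC =====
def Spec_module_to_service (module : String) (out : Option String) : Prop := out = module_to_service_alt module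
instance (module : String) (out : Option String) : Decidable (Spec_module_to_service module out) := by unfold Spec_module_to_service; infer_instance

-- ===== CLAIM (what is proved, stated in full; the proofs are below) =====
def Claim_equal_module_to_service : Prop := ∀ (module : String), Dom_module_to_service module → Spec_module_to_service module (module_to_service module)

-- ===== LEMMAS AND PROOFS =====

theorem toList_inj (s t : String) : s.toList = t.toList ↔ s = t := by
  constructor
  · intro h
    have := congrArg String.ofList h
    simpa using this
  · intro h; rw [h]

theorem ofList_eq_iff (l : List Char) (w : String) : String.ofList l = w ↔ l = w.toList := by
  constructor
  · intro h; rw [← h]; simp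
  · intro h; subst h; simp

-- head-map helper used to describe Python's str.split(".")
def pvMapHead (f : List Char → List Char) : List (List Char) → List (List Char)
  | [] => []
  | a :: as => f a :: as

-- the result of cs.split(".") described structurally
def pySplitDot : List Char → List (List Char)
  | [] => [[]]
  | c :: cs =>
    if c = '.' then [] :: pySplitDot cs
    else pvMapHead (fun a => c :: a) (pySplitDot cs)

theorem pySplitDot_ne_nil (cs : List Char) : pySplitDot cs ≠ [] := by
  induction cs with
  | nil => simp [pySplitDot]
  | cons c cs ih =>
    simp only [pySplitDot]
    split
    · simp
    · cases h : pySplitDot cs with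
      | nil => exact absurd h ih
      | cons a as => simp [pvMapHead]

theorem pvMapHead_id (xs : List (List Char)) : pvMapHead (fun a => a) xs = xs := by
  cases xs <;> rfl

theorem go_dot (fuel : Nat) : ∀ (l cur : List Char) (_ : l.length < fuel) (accs : List (List Char)),
    PySem.Chars.splitOn.go ['.'] fuel l cur accs =
      accs.reverse ++ pvMapHead (fun a => cur.reverse ++ a) (pySplitDot l) := by
  induction fuel with
  | zero => intro l cur h accs; omega
  | succ fuel ih =>
    intro l cur hlen accs
    cases l with
    | nil =>
      show (cur.reverse :: accs).reverse = _
      simp [pySplitDot, pvMapHead]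
    | cons c rest =>
      show (if List.isPrefixOf ['.'] (c :: rest) then
              PySem.Chars.splitOn.go ['.'] fuel (List.drop (List.length ['.']) (c :: rest)) [] (cur.reverse :: accs)
            else PySem.Chars.splitOn.go ['.'] fuel rest (c :: cur) accs) = _
      by_cases h : c = '.'
      · subst h
        rw [if_pos (by simp [List.isPrefixOf])]
        rw [ih _ _ (by simp at hlen ⊢; omega) _]
        simp only [List.reverse_nil, List.nil_append, pvMapHead_id, List.reverse_cons,
          List.append_assoc, pySplitDot]
        simp [pvMapHead]
      · rw [if_neg (by simp [List.isPrefixOf]; intro h'; exact h h'.symm)]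
        rw [ih _ _ (by simp at hlen ⊢; omega) _]
        simp only [pySplitDot, if_neg h]
        cases hs : pySplitDot rest with
        | nil => exact absurd hs (pySplitDot_ne_nil rest)
        | cons a as => simp [pvMapHead]

theorem splitOn_dot (cs : List Char) : PySem.Chars.splitOn cs ['.'] = pySplitDot cs := by
  show PySem.Chars.splitOn.go ['.'] (cs.length + 1) cs [] [] = _
  rw [go_dot _ _ _ (by omega) _]
  simp [pvMapHead_id]

theorem pySplitDot_partition (cs : List Char) :
    pySplitDot cs = (partitionDot cs).1 ::
      (if (partitionDot cs).2.1 = true then pySplitDot (partitionDot cs).2.2 else []) := by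
  induction cs with
  | nil => simp [pySplitDot, partitionDot]
  | cons c cs ih =>
    by_cases h : c = '.'
    · simp [pySplitDot, partitionDot, h]
    · simp only [pySplitDot, partitionDot, if_neg h]
      rw [ih]
      simp [pvMapHead]

theorem partition_root_iff (cs w : List Char) (hw : '.' ∉ w) :
    (partitionDot cs).1 = w ↔ (cs = w ∨ (w ++ ['.']) <+: cs) := by
  induction cs generalizing w with
  | nil =>
    simp only [partitionDot]
    constructor
    · intro h; left; exact h
    · rintro (h | ⟨t, ht⟩)
      · exact h
      · exact absurd ht (by simp)
  | cons c cs ih =>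
    by_cases h : c = '.'
    · subst h
      simp only [partitionDot]
      constructor
      · intro h'
        subst h'
        right
        exact ⟨cs, by simp⟩
      · rintro (h' | h')
        · exfalso; apply hw; rw [← h']; simp
        · cases w with
          | nil => rfl
          | cons a w' =>
            obtain ⟨t, ht⟩ := h'
            simp only [List.cons_append, List.append_assoc] at ht
            injection ht with h1 _
            exact absurd (by simp [h1] : ('.':Char) ∈ a :: w') hw
    · simp only [partitionDot, if_neg h]
      cases w with
      | nil =>
        simp only [List.nil_append]
        constructor
        · intro h'; simp at h'
        · rintro (h' | ⟨t, ht⟩)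
          · exact absurd h' (by simp)
          · injection ht with h1 _
            exact absurd h1.symm h
      | cons a w' =>
        have hw' : '.' ∉ w' := fun hmem => hw (by simp [hmem])
        constructor
        · intro h'
          simp only [List.cons.injEq] at h'
          obtain ⟨hca, hrest⟩ := h'
          rcases (ih w' hw').mp hrest with h1 | ⟨t, ht⟩
          · left; rw [hca, h1]
          · right
            exact ⟨t, by rw [← ht]; simp [hca]⟩
        · rintro (h' | h')
          · simp only [List.cons.injEq] at h'
            obtain ⟨hca, hrest⟩ := h'
            simp only [List.cons.injEq]
            exact ⟨hca, (ih w' hw').mpr (Or.inl hrest)⟩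
          · simp only [List.cons_append] at h'
            rw [List.cons_prefix_cons] at h'
            obtain ⟨hca, hrest⟩ := h'
            simp only [List.cons.injEq]
            exact ⟨hca.symm, (ih w' hw').mpr (Or.inr hrest)⟩

-- A's "module == w or module.startswith(w + '.')" test is exactly "root segment = w"
theorem cond_iff (module : String) (w wd : String) (hw : '.' ∉ w.toList)
    (hwd : wd.toList = w.toList ++ ['.']) :
    (module == w || PySem.Str.startswith module wd) = true ↔
      (partitionDot module.toList).1 = w.toList := by
  rw [Bool.or_eq_true, beq_iff_eq, PySem.Str.startswith_eq, hwd, PySem.Chars.startswith_iff,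
      partition_root_iff _ _ hw, ← toList_inj]

-- the shared-libs test of A forces the root segment to be "libs"
theorem libs_cond (module : String)
    (hc : (module == "libs" ||
        (PySem.Set.ofList ["libs.platform", "libs.contracts"]).any
          (fun lib => module == lib || PySem.Str.startswith module (lib ++ "."))) = true) :
    (partitionDot module.toList).1 = "libs".toList := by
  rw [partition_root_iff _ _ (by decide)]
  rw [show PySem.Set.ofList ["libs.platform", "libs.contracts"] = ["libs.platform", "libs.contracts"]
      from by decide] at hc
  simp only [List.any_cons, List.any_nil, Bool.or_false, Bool.or_eq_true, beq_iff_eq,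
    PySem.Str.startswith_eq, PySem.Chars.startswith_iff] at hc
  rcases hc with h | (h | h) | (h | h)
  · left; rw [h]
  · right; rw [h]; exact ⟨"platform".toList, by decide⟩
  · exact Or.inr (List.IsPrefix.trans ⟨"platform.".toList, by decide⟩ h)
  · right; rw [h]; exact ⟨"contracts".toList, by decide⟩
  · exact Or.inr (List.IsPrefix.trans ⟨"contracts.".toList, by decide⟩ h)

-- ===== VERDICT (by name: the statement is the Claim_ definition above) =====
theorem module_to_service_spec : Claim_equal_module_to_service := by
  intro module _
  unfold Spec_module_to_service module_to_service module_to_service_alt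
  rcases hp : partitionDot module.toList with ⟨root, sep, rest⟩
  have hI := cond_iff module "ingestor" "ingestor." (by decide) (by decide)
  have hS := cond_iff module "services" "services." (by decide) (by decide)
  rw [hp] at hI hS
  dsimp only at hI hS ⊢
  by_cases hc1 : (module == "libs" ||
      (PySem.Set.ofList ["libs.platform", "libs.contracts"]).any
        (fun lib => module == lib || PySem.Str.startswith module (lib ++ "."))) = true
  · rw [if_pos hc1]
    have hr : root = "libs".toList := by
      have h2 := libs_cond module hc1; rw [hp] at h2; exact h2
    subst hr
    rw [if_neg (by decide), if_neg (by rintro ⟨h, _⟩; exact absurd h (by decide))]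
  · rw [if_neg hc1]
    by_cases hc2 : root = "ingestor".toList
    · rw [if_pos (hI.mpr hc2), if_pos hc2]
    · rw [if_neg (fun h => hc2 (hI.mp h)), if_neg hc2]
      by_cases hc3 : root = "services".toList
      · rw [if_pos (hS.mpr hc3)]
        have hps := pySplitDot_partition module.toList
        rw [hp] at hps
        dsimp only at hps
        rw [show (".".toList) = ['.'] from by decide, splitOn_dot, hps]
        by_cases hsep : sep = true
        · rw [if_pos hsep]
          cases hr : pySplitDot rest with
          | nil => exact absurd hr (pySplitDot_ne_nil rest)
          | cons p1 tail =>
            have hp1 : p1 = (partitionDot rest).1 := by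
              have h2 := pySplitDot_partition rest
              rw [hr] at h2
              exact (List.cons_eq_cons.mp h2).1
            rw [if_pos (by simp)]
            have hget : PySem.List.pyGetD (List.map String.ofList (root :: p1 :: tail)) 1 "" =
                String.ofList p1 := by
              simp [PySem.List.pyGetD]
            rw [hget]
            have hmem : ((PySem.Set.ofList
                ["ai_gateway", "query_api", "processor", "dashboard"]).contains
                  (String.ofList p1)) = true ↔
                p1 ∈ ["ai_gateway".toList, "query_api".toList, "processor".toList,
                  "dashboard".toList] := by
              rw [show PySem.Set.ofList ["ai_gateway", "query_api", "processor", "dashboard"] =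
                  ["ai_gateway", "query_api", "processor", "dashboard"] from by decide]
              simp [PySem.Set.contains, ofList_eq_iff]
            by_cases hm : p1 ∈ ["ai_gateway".toList, "query_api".toList, "processor".toList,
                "dashboard".toList]
            · rw [if_pos (hmem.mpr hm), if_pos ⟨hc3, hsep⟩, if_pos (hp1 ▸ hm), ← hp1]
            · rw [if_neg (fun h => hm (hmem.mp h)), if_pos ⟨hc3, hsep⟩, if_neg (hp1 ▸ hm)]
        · rw [if_neg hsep, if_neg (by simp), if_neg (by rintro ⟨_, h⟩; exact hsep h)]
      · rw [if_neg (fun h => hc3 (hS.mp h)), if_neg (by rintro ⟨h, _⟩; exact hc3 h)]
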